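-- pv_equiv track=rewrite | github.com/lord-cyclone100/Clg-python | assignment_4/4.py | checkNumAndAlpha
-- ===== SOURCE A (Python) =====
-- def checkNumAndAlpha(s):
--     alpha = num = False
--     for i in s:
--         if i.isdigit():
--             num = True
--         elif i.isalpha():
--             alpha = True
--     return (num and alpha)
-- ===== SOURCE B (Python) =====
-- def checkNumAndAlpha(s):
--     return any(c.isdigit() for c in s) and any(c.isalpha() for c in s)
-- ===== Notes on version B (the rewrite author's own statement) =====
-- stated objective: idiomatic
-- what changed: Replaces the single flag-setting loop with two independent short-circuiting existence checks (any(isdigit) and any(isalpha)) with no mutable state.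
import Mathlib
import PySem

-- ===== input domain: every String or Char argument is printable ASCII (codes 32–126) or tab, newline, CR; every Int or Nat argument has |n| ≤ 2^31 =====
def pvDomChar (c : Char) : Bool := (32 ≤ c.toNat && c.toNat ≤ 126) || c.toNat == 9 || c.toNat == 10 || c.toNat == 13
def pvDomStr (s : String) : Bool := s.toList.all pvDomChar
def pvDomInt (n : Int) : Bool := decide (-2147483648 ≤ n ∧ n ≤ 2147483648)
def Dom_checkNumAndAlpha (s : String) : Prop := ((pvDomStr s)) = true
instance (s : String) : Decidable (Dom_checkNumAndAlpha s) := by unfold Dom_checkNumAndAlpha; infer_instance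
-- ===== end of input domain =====

-- ===== PORT A =====
-- one line: B replaces A's single flag-setting loop by two independent existence scans (idiomatic).
def checkNumAndAlpha (s : String) : Bool :=
  let st := s.toList.foldl
    (fun (st : Bool × Bool) i =>
      if PySem.Chars.isdigit i then (true, st.2)
      else if PySem.Chars.isalpha i then (st.1, true)
      else st) (false, false)
  st.1 && st.2

-- ===== PORT B =====
def checkNumAndAlpha_alt (s : String) : Bool :=
  s.toList.any (fun c => PySem.Chars.isdigit c) && s.toList.any (fun c => PySem.Chars.isalpha c)

-- ===== PRECONDITION & SPEC =====
def Spec_checkNumAndAlpha (s : String) (out : Bool) : Prop := out = checkNumAndAlpha_alt s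
instance (s : String) (out : Bool) : Decidable (Spec_checkNumAndAlpha s out) := by unfold Spec_checkNumAndAlpha; infer_instance

-- ===== CLAIM (what is proved, stated in full; the proofs are below) =====
def Claim_equal_checkNumAndAlpha : Prop := ∀ (s : String), Dom_checkNumAndAlpha s → Spec_checkNumAndAlpha s (checkNumAndAlpha s)

-- ===== LEMMAS AND PROOFS =====

-- ===== VERDICT (by name: the statement is the Claim_ definition above) =====
lemma digit_not_alpha (c : Char) (h : PySem.Chars.isdigit c = true) :
    PySem.Chars.isalpha c = false := by
  simp [PySem.Chars.isdigit, Char.le_def] at h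
  simp [PySem.Chars.isalpha, PySem.Chars.isupper, PySem.Chars.islower, Char.le_def]
  obtain ⟨h1, h2⟩ := h
  refine ⟨fun h3 => ?_, fun h3 => ?_⟩ <;>
  · exfalso
    have := UInt32.le_trans h3 h2
    revert this
    decide

lemma foldl_flags (l : List Char) (num alpha : Bool) :
    l.foldl
      (fun (st : Bool × Bool) i =>
        if PySem.Chars.isdigit i then (true, st.2)
        else if PySem.Chars.isalpha i then (st.1, true)
        else st) (num, alpha)
      = (num || l.any (fun c => PySem.Chars.isdigit c),
         alpha || l.any (fun c => !PySem.Chars.isdigit c && PySem.Chars.isalpha c)) := by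
  induction l generalizing num alpha with
  | nil => simp
  | cons c l ih =>
    simp only [List.foldl_cons, List.any_cons]
    by_cases hd : PySem.Chars.isdigit c = true
    · simp [hd, ih]
    · simp only [Bool.not_eq_true] at hd
      by_cases ha : PySem.Chars.isalpha c = true
      · simp [hd, ha, ih]
      · simp only [Bool.not_eq_true] at ha
        simp [hd, ha, ih]

lemma any_alpha_eq (l : List Char) :
    l.any (fun c => !PySem.Chars.isdigit c && PySem.Chars.isalpha c)
      = l.any (fun c => PySem.Chars.isalpha c) := by
  induction l with
  | nil => rfl
  | cons c l ih =>
    simp only [List.any_cons, ih]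
    congr 1
    by_cases hd : PySem.Chars.isdigit c = true
    · simp [hd, digit_not_alpha c hd]
    · simp only [Bool.not_eq_true] at hd
      simp [hd]

theorem checkNumAndAlpha_spec : Claim_equal_checkNumAndAlpha := by
  intro s _
  unfold Spec_checkNumAndAlpha checkNumAndAlpha checkNumAndAlpha_alt
  simp [foldl_flags, any_alpha_eq]
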